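-- pv_equiv track=rewrite | github.com/esaatech/esaaedu-backend | home/course_recommendations.py | get_category_priority
-- ===== SOURCE A (Python) =====
-- from typing import List, Dict, Optional, Tuple
--
-- INTEREST_TO_CATEGORY_MAP = {
--     'Coding': ['Programming', 'Computer Science', 'Mobile App Development', 'Web Development'],
--     'Robotics': ['Robotics', 'Internet of Things (IoT)', 'Engineering'],
--     'Electronics': ['Internet of Things (IoT)', 'Robotics', 'Engineering'],
--     'Math Skills': ['Mathematics', 'Data Science'],
--     'Game Development': ['Game Development'],
--     'Web Development': ['Web Development'],
--     '3D Design': ['Creative Technology'],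
--     'AI for Kids': ['Artificial Intelligence'],
--     'General STEM Exploration': ['Science', 'Mathematics', 'Physics', 'Chemistry', 'Biology'],
-- }
--
-- def normalize_category(category: Optional[str]) -> str:
--     """Normalizes category name for matching (handles variations)"""
--     if not category or not isinstance(category, str):
--         return ''
--     return category.strip()
--
-- def get_category_priority(interest_areas: List[str], course_category: str) -> int:
--     """Gets priority score for category match (higher for specific matches)"""
--     priority = 0
--     normalized_course_category = normalize_category(course_category)
--
--     for interest in interest_areas:
--         categories = INTEREST_TO_CATEGORY_MAP.get(interest, [])
--
--         if any(normalize_category(cat) == normalized_course_category for cat in categories):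
--             # General STEM Exploration gets lower priority
--             if interest == 'General STEM Exploration':
--                 priority = max(priority, 1)
--             else:
--                 priority = max(priority, 2)
--
--     return priority
-- ===== SOURCE B (Python) =====
-- INTEREST_TO_CATEGORY_MAP = {
--     'Coding': ['Programming', 'Computer Science', 'Mobile App Development', 'Web Development'],
--     'Robotics': ['Robotics', 'Internet of Things (IoT)', 'Engineering'],
--     'Electronics': ['Internet of Things (IoT)', 'Robotics', 'Engineering'],
--     'Math Skills': ['Mathematics', 'Data Science'],
--     'Game Development': ['Game Development'],
--     'Web Development': ['Web Development'],
--     '3D Design': ['Creative Technology'],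
--     'AI for Kids': ['Artificial Intelligence'],
--     'General STEM Exploration': ['Science', 'Mathematics', 'Physics', 'Chemistry', 'Biology'],
-- }
--
-- # Reverse index: normalized category name -> set of interest keys listing it.
-- CATEGORY_TO_INTERESTS = {}
-- for _interest, _cats in INTEREST_TO_CATEGORY_MAP.items():
--     for _cat in _cats:
--         CATEGORY_TO_INTERESTS.setdefault(_cat.strip(), set()).add(_interest)
--
-- def get_category_priority(interest_areas, course_category):
--     matching = CATEGORY_TO_INTERESTS.get(course_category.strip(), set()) & set(interest_areas)
--     if any(i != 'General STEM Exploration' for i in matching):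
--         return 2
--     if matching:
--         return 1
--     return 0
-- ===== Notes on version B (the rewrite author's own statement) =====
-- stated objective: faster
-- what changed: Replaces A's per-interest scan over each interest's category list (normalizing every category on every call) by a module-level precomputed reverse index (normalized category -> set of interests); the function becomes one dict lookup, a set intersection with the interest areas, and a specific-vs-General test.
import Mathlib
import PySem

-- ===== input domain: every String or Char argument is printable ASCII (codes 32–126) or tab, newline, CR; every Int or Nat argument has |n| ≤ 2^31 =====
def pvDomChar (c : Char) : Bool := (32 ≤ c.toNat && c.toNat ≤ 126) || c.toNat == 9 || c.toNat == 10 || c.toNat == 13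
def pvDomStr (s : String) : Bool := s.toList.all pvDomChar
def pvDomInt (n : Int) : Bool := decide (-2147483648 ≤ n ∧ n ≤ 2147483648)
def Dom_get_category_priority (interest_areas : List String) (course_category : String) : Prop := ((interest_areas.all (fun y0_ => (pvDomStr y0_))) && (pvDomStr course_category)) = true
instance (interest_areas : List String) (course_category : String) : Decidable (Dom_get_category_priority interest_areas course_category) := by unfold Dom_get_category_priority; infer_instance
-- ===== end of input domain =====

-- B replaces A's per-interest scan over category lists by a precomputed reverse index
-- (category → interests) plus one lookup and a set intersection (objective: simpler).

-- ===== PORT A =====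
def INTEREST_TO_CATEGORY_MAP : PySem.Dict String (List String) := PySem.Dict.ofList [
    ("Coding", ["Programming", "Computer Science", "Mobile App Development", "Web Development"]),
    ("Robotics", ["Robotics", "Internet of Things (IoT)", "Engineering"]),
    ("Electronics", ["Internet of Things (IoT)", "Robotics", "Engineering"]),
    ("Math Skills", ["Mathematics", "Data Science"]),
    ("Game Development", ["Game Development"]),
    ("Web Development", ["Web Development"]),
    ("3D Design", ["Creative Technology"]),
    ("AI for Kids", ["Artificial Intelligence"]),
    ("General STEM Exploration", ["Science", "Mathematics", "Physics", "Chemistry", "Biology"])]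

def normalize_category (category : String) : String :=
  if category == "" then "" else PySem.Str.strip category

def get_category_priority (interest_areas : List String) (course_category : String) : Int :=
  let normalized_course_category := normalize_category course_category
  interest_areas.foldl (fun priority interest =>
    let categories := INTEREST_TO_CATEGORY_MAP.getD interest []
    if categories.any (fun cat => normalize_category cat == normalized_course_category) then
      if interest == "General STEM Exploration" then max priority 1 else max priority 2
    else priority) 0

-- ===== PORT B =====
-- CATEGORY_TO_INTERESTS: built exactly as Source B's module-level loop (setdefault + add).
def CATEGORY_TO_INTERESTS : PySem.Dict String (PySem.Set String) :=
  INTEREST_TO_CATEGORY_MAP.items.foldl (fun d p =>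
    p.2.foldl (fun d cat =>
      let k := PySem.Str.strip cat
      d.insert k (PySem.Set.add (d.getD k PySem.Set.empty) p.1)) d) PySem.Dict.empty

def get_category_priority_alt (interest_areas : List String) (course_category : String) : Int :=
  let matching := PySem.Set.inter
    (CATEGORY_TO_INTERESTS.getD (PySem.Str.strip course_category) PySem.Set.empty)
    (PySem.Set.ofList interest_areas)
  if matching.any (fun i => !(i == "General STEM Exploration")) then 2
  else if !matching.isEmpty then 1
  else 0

-- ===== PRECONDITION & SPEC =====
def Spec_get_category_priority (interest_areas : List String) (course_category : String) (out : Int) : Prop := out = get_category_priority_alt interest_areas course_category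
instance (interest_areas : List String) (course_category : String) (out : Int) : Decidable (Spec_get_category_priority interest_areas course_category out) := by unfold Spec_get_category_priority; infer_instance

-- ===== CLAIM (what is proved, stated in full; the proofs are below) =====
def Claim_equal_get_category_priority : Prop := ∀ (interest_areas : List String) (course_category : String), Dom_get_category_priority interest_areas course_category → Spec_get_category_priority interest_areas course_category (get_category_priority interest_areas course_category)

-- ===== LEMMAS AND PROOFS =====
lemma nc0 : normalize_category "Programming" = "Programming" := by decide
lemma nc1 : normalize_category "Computer Science" = "Computer Science" := by decide
lemma nc2 : normalize_category "Mobile App Development" = "Mobile App Development" := by decide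
lemma nc3 : normalize_category "Web Development" = "Web Development" := by decide
lemma nc4 : normalize_category "Robotics" = "Robotics" := by decide
lemma nc5 : normalize_category "Internet of Things (IoT)" = "Internet of Things (IoT)" := by decide
lemma nc6 : normalize_category "Engineering" = "Engineering" := by decide
lemma nc7 : normalize_category "Mathematics" = "Mathematics" := by decide
lemma nc8 : normalize_category "Data Science" = "Data Science" := by decide
lemma nc9 : normalize_category "Game Development" = "Game Development" := by decide
lemma nc10 : normalize_category "Creative Technology" = "Creative Technology" := by decide
lemma nc11 : normalize_category "Artificial Intelligence" = "Artificial Intelligence" := by decide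
lemma nc12 : normalize_category "Science" = "Science" := by decide
lemma nc13 : normalize_category "Physics" = "Physics" := by decide
lemma nc14 : normalize_category "Chemistry" = "Chemistry" := by decide
lemma nc15 : normalize_category "Biology" = "Biology" := by decide

-- A's per-interest match test agrees with membership in the reverse index.
lemma match_eq (i norm : String) :
    ((INTEREST_TO_CATEGORY_MAP.getD i []).any fun c => normalize_category c == norm)
      = (CATEGORY_TO_INTERESTS.getD norm PySem.Set.empty).contains i := by
  rw [show CATEGORY_TO_INTERESTS = PySem.Dict.mk [
    ("Programming", ["Coding"]),
    ("Computer Science", ["Coding"]),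
    ("Mobile App Development", ["Coding"]),
    ("Web Development", ["Coding", "Web Development"]),
    ("Robotics", ["Robotics", "Electronics"]),
    ("Internet of Things (IoT)", ["Robotics", "Electronics"]),
    ("Engineering", ["Robotics", "Electronics"]),
    ("Mathematics", ["Math Skills", "General STEM Exploration"]),
    ("Data Science", ["Math Skills"]),
    ("Game Development", ["Game Development"]),
    ("Creative Technology", ["3D Design"]),
    ("Artificial Intelligence", ["AI for Kids"]),
    ("Science", ["General STEM Exploration"]),
    ("Physics", ["General STEM Exploration"]),
    ("Chemistry", ["General STEM Exploration"]),
    ("Biology", ["General STEM Exploration"])] from rfl]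
  rw [show INTEREST_TO_CATEGORY_MAP = PySem.Dict.mk [
    ("Coding", ["Programming", "Computer Science", "Mobile App Development", "Web Development"]),
    ("Robotics", ["Robotics", "Internet of Things (IoT)", "Engineering"]),
    ("Electronics", ["Internet of Things (IoT)", "Robotics", "Engineering"]),
    ("Math Skills", ["Mathematics", "Data Science"]),
    ("Game Development", ["Game Development"]),
    ("Web Development", ["Web Development"]),
    ("3D Design", ["Creative Technology"]),
    ("AI for Kids", ["Artificial Intelligence"]),
    ("General STEM Exploration", ["Science", "Mathematics", "Physics", "Chemistry", "Biology"])] from rfl]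
  simp only [PySem.Dict.getD, PySem.Dict.get?, List.find?]
  repeat' split
  all_goals (try simp only [beq_iff_eq] at *)
  all_goals (try subst_vars)
  all_goals (first | decide | simp_all [nc0, nc1, nc2, nc3, nc4, nc5, nc6, nc7, nc8, nc9, nc10, nc11, nc12, nc13, nc14, nc15])
  all_goals simp_all [eq_comm]

-- Proof-only helpers: A's loop body, and the common 0/1/2 score both programs compute.
def stepA (ncc : String) (priority : Int) (interest : String) : Int :=
  let categories := INTEREST_TO_CATEGORY_MAP.getD interest []
  if categories.any (fun cat => normalize_category cat == ncc) then
    if interest == "General STEM Exploration" then max priority 1 else max priority 2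
  else priority

def scoreOf (ncc : String) (l : List String) : Int :=
  if l.any (fun i => ((CATEGORY_TO_INTERESTS.getD ncc PySem.Set.empty).contains i) && !(i == "General STEM Exploration")) then 2
  else if l.any (fun i => (CATEGORY_TO_INTERESTS.getD ncc PySem.Set.empty).contains i) then 1 else 0

lemma scoreOf_nonneg (ncc : String) (l : List String) : 0 <= scoreOf ncc l := by
  unfold scoreOf; split_ifs <;> omega

lemma portA_eq (ia : List String) (cc : String) :
    get_category_priority ia cc = ia.foldl (stepA (normalize_category cc)) 0 := rfl

lemma norm_eq_strip (cc : String) : normalize_category cc = PySem.Str.strip cc := by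
  by_cases h : cc = ""
  . subst h; decide
  . simp [normalize_category, h]

lemma max_step (c g a1 a2 : Bool) (p : Int) :
    max (if c then (if g then max p 1 else max p 2) else p)
        (if a1 then 2 else if a2 then 1 else 0)
      = max p (if (c && !g) || a1 then 2 else if c || a2 then 1 else 0) := by
  cases c <;> cases g <;> cases a1 <;> cases a2 <;> simp

lemma loop_max (ncc : String) (l : List String) : forall (p : Int), 0 <= p ->
    l.foldl (stepA ncc) p = max p (scoreOf ncc l) := by
  induction l with
  | nil =>
    intro p hp
    simp only [List.foldl_nil, scoreOf, List.any_nil, if_neg Bool.false_ne_true]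
    omega
  | cons i l ih =>
    intro p hp
    have hstep : stepA ncc p i =
        if (CATEGORY_TO_INTERESTS.getD ncc PySem.Set.empty).contains i then
          (if i == "General STEM Exploration" then max p 1 else max p 2)
        else p := by
      simp only [stepA, match_eq]
    have hnn : 0 <= stepA ncc p i := by rw [hstep]; split_ifs <;> omega
    rw [List.foldl_cons, ih _ hnn, hstep]
    simp only [scoreOf, List.any_cons]
    exact max_step _ _ _ _ p

lemma portB_eq (ia : List String) (cc : String) :
    get_category_priority_alt ia cc = scoreOf (PySem.Str.strip cc) ia := by
  unfold get_category_priority_alt scoreOf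
  have h1 : ((PySem.Set.inter
        (CATEGORY_TO_INTERESTS.getD (PySem.Str.strip cc) PySem.Set.empty)
        (PySem.Set.ofList ia)).any (fun i => !(i == "General STEM Exploration")))
      = ia.any (fun i => ((CATEGORY_TO_INTERESTS.getD (PySem.Str.strip cc) PySem.Set.empty).contains i) && !(i == "General STEM Exploration")) := by
    rw [Bool.eq_iff_iff]
    simp only [List.any_eq_true, Bool.and_eq_true, PySem.Set.contains_iff,
      PySem.Set.mem_inter, PySem.Set.mem_ofList]
    constructor
    . rintro ⟨x, ⟨hS, hIa⟩, hG⟩; exact ⟨x, hIa, hS, hG⟩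
    . rintro ⟨x, hIa, hS, hG⟩; exact ⟨x, ⟨hS, hIa⟩, hG⟩
  have h2 : (!(PySem.Set.inter
        (CATEGORY_TO_INTERESTS.getD (PySem.Str.strip cc) PySem.Set.empty)
        (PySem.Set.ofList ia)).isEmpty)
      = ia.any (fun i => (CATEGORY_TO_INTERESTS.getD (PySem.Str.strip cc) PySem.Set.empty).contains i) := by
    rw [Bool.eq_iff_iff]
    simp only [Bool.not_eq_true', List.isEmpty_eq_false_iff_exists_mem,
      List.any_eq_true, PySem.Set.contains_iff, PySem.Set.mem_inter, PySem.Set.mem_ofList]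
    constructor
    . rintro ⟨x, hS, hIa⟩; exact ⟨x, hIa, hS⟩
    . rintro ⟨x, hIa, hS⟩; exact ⟨x, hS, hIa⟩
  simp only [h1, h2]

-- ===== VERDICT (by name: the statement is the Claim_ definition above) =====
theorem get_category_priority_spec : Claim_equal_get_category_priority := by
  intro ia cc _
  unfold Spec_get_category_priority
  rw [portA_eq, loop_max _ _ 0 le_rfl, portB_eq, norm_eq_strip]
  have := scoreOf_nonneg (PySem.Str.strip cc) ia
  omega
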